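-- pv_equiv track=rewrite | github.com/julightzhong10/-Prob_DB | lift.py | check_indpt_UCQ
-- ===== SOURCE A (Python) =====
-- def check_indpt_UCQ(q):
--     '''
--     check the if the input query has indpt UCQs. If two atoms has same relation, the two atoms are dependent
--     args:
--         q, query
--     return:
--         list1, list of independent UCQs. If no indpt atoms, return empty list
--         list2, list of dependent UCQs. If no dpt atoms, return empty list
--     '''
--     optset_list=[]
--     for i in range(len(q)):
--         tmp_set=set()
--         for j in range(len(q[i])):
--             tmp_set.add(q[i][j][0])
--         optset_list.append(tmp_set)
--     indpts=[]
--     dpts=[]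
--     for i in range(len(optset_list)):
--         curr_q=optset_list[i]
--         indpts.append(q[i])
--         for j in range(len(optset_list)):
--             if j==i:
--                 continue
--             if (not curr_q.isdisjoint(optset_list[j])):
--                 indpts.pop()
--                 dpts.append(q[i])
--                 break
--     return indpts,dpts
-- ===== SOURCE B (Python) =====
-- def check_indpt_UCQ(q):
--     # Count, per relation name, how many subqueries mention it; a subquery is
--     # independent iff every one of its relations is mentioned by only itself.
--     rsets = [{a[0] for a in c} for c in q]
--     counts = {}
--     for s in rsets:
--         for r in s:
--             counts[r] = counts.get(r, 0) + 1
--     indpts = []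
--     dpts = []
--     for c, s in zip(q, rsets):
--         if all(counts[r] == 1 for r in s):
--             indpts.append(c)
--         else:
--             dpts.append(c)
--     return indpts, dpts
-- ===== Notes on version B (the rewrite author's own statement) =====
-- stated objective: alternative
-- what changed: Replaces the pairwise disjointness test of every subquery's relation set against every other subquery's set with a single dict counting how many subqueries mention each relation; a subquery is independent iff all its relations have count 1.
import Mathlib
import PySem

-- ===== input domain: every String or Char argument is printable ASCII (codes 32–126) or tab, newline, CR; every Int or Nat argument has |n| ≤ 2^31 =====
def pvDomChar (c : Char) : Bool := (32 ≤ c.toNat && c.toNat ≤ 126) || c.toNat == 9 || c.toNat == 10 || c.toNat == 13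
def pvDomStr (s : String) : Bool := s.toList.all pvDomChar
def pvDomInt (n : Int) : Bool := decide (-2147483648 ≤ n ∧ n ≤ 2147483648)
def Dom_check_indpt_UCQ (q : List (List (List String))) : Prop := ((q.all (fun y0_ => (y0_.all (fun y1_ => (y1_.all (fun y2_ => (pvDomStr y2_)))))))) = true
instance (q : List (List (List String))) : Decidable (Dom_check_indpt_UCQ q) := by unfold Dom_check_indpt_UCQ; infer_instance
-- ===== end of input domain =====

-- B replaces A's pairwise relation-set disjointness scan by one dict counting, per
-- relation, how many subqueries mention it (a subquery is independent iff all counts are 1).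

-- ===== PORT A =====
-- A's inner 'for j in range(len(optset_list))' with 'continue' on j==i and 'break' on the
-- first non-disjoint set: returns whether such a j exists (the break target).
def pvAInner (i : Int) (curr : PySem.Set String) : List (Int × PySem.Set String) → Bool
  | [] => false
  | (j, s) :: rest =>
      if j == i then pvAInner i curr rest
      else if !(PySem.Set.isdisjoint curr s) then true
      else pvAInner i curr rest

-- A's index loops 'for i in range(len(q))' are ported as folds over the list (same
-- elements, same order); A's append-then-pop on a break collapses to appending q[i]
-- only to dpts when the inner loop breaks.
def check_indpt_UCQ (q : List (List (List String))) : List (List (List String)) × List (List (List String)) :=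
  let optset_list := q.map (fun c =>
    c.foldl (fun s a => PySem.Set.add s (PySem.List.pyGetD a 0 "")) PySem.Set.empty)
  (PySem.List.enumerate (q.zip optset_list) 0).foldl
    (fun acc p =>
      if pvAInner p.1 p.2.2 (PySem.List.enumerate optset_list 0)
      then (acc.1, acc.2 ++ [p.2.1])
      else (acc.1 ++ [p.2.1], acc.2))
    ([], [])

-- ===== PORT B =====
-- {a[0] for a in c}
def pvRelSet (c : List (List String)) : PySem.Set String :=
  PySem.Set.ofList (c.map (fun a => PySem.List.pyGetD a 0 ""))

def check_indpt_UCQ_alt (q : List (List (List String))) : List (List (List String)) × List (List (List String)) :=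
  let rsets := q.map pvRelSet
  let counts := rsets.foldl
    (fun d s => s.foldl (fun d r => d.insert r (d.getD r 0 + 1)) d) PySem.Dict.empty
  (q.zip rsets).foldl
    (fun acc p =>
      if p.2.all (fun r => counts.getD r 0 == (1 : Int))
      then (acc.1 ++ [p.1], acc.2)
      else (acc.1, acc.2 ++ [p.1]))
    ([], [])

-- ===== PRECONDITION & SPEC =====
-- Pre_ excludes queries containing an empty atom: there Python's q[i][j][0] raises IndexError.
def Pre_check_indpt_UCQ (q : List (List (List String))) : Prop :=
  ∀ c ∈ q, ∀ a ∈ c, a ≠ []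
instance (q : List (List (List String))) : Decidable (Pre_check_indpt_UCQ q) := by
  unfold Pre_check_indpt_UCQ; infer_instance

def pvWitness_check_indpt_UCQ : List (List (List String)) :=
  [[["R", "x"], ["S", "y"]], [["T", "z"]], [["S", "u"]]]

def Spec_check_indpt_UCQ (q : List (List (List String))) (out : List (List (List String)) × List (List (List String))) : Prop := out = check_indpt_UCQ_alt q
instance (q : List (List (List String))) (out : List (List (List String)) × List (List (List String))) : Decidable (Spec_check_indpt_UCQ q out) := by unfold Spec_check_indpt_UCQ; infer_instance

-- ===== CLAIM (what is proved, stated in full; the proofs are below) =====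
def Claim_equal_check_indpt_UCQ : Prop := ∀ (q : List (List (List String))), Dom_check_indpt_UCQ q → Pre_check_indpt_UCQ q → Spec_check_indpt_UCQ q (check_indpt_UCQ q)

-- ===== LEMMAS AND PROOFS =====

-- A's set-building fold equals B's set comprehension.
theorem pvRelSet_eq (c : List (List String)) :
    c.foldl (fun s a => PySem.Set.add s (PySem.List.pyGetD a 0 "")) PySem.Set.empty
      = pvRelSet c := by
  rw [pvRelSet, ← PySem.Set.update_nil_left, PySem.Set.update_map_eq_foldl_add]
  rfl

-- Generic shape of both output loops: append each element to one of the two sides.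
theorem pvPartFold {α β : Type} (f : α → Bool) (g : α → β) (l : List α) (ind dp : List β) :
    l.foldl (fun acc x => if f x then (acc.1, acc.2 ++ [g x]) else (acc.1 ++ [g x], acc.2)) (ind, dp)
      = (ind ++ (l.filter (fun x => !f x)).map g, dp ++ (l.filter f).map g) := by
  induction l generalizing ind dp with
  | nil => simp
  | cons x xs ih =>
      by_cases h : f x = true <;> simp [h, ih, List.append_assoc]

theorem pvPartFold' {α β : Type} (f : α → Bool) (g : α → β) (l : List α) (ind dp : List β) :
    l.foldl (fun acc x => if f x then (acc.1 ++ [g x], acc.2) else (acc.1, acc.2 ++ [g x])) (ind, dp)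
      = (ind ++ (l.filter f).map g, dp ++ (l.filter (fun x => !f x)).map g) := by
  induction l generalizing ind dp with
  | nil => simp
  | cons x xs ih =>
      by_cases h : f x = true <;> simp [h, ih, List.append_assoc]

-- A's inner loop finds j with j ≠ i and the sets not disjoint.
theorem pvAInner_eq_any (i : Int) (curr : PySem.Set String) (l : List (Int × PySem.Set String)) :
    pvAInner i curr l = l.any (fun p => !(p.1 == i) && !(PySem.Set.isdisjoint curr p.2)) := by
  induction l with
  | nil => rfl
  | cons p rest ih =>
      obtain ⟨j, s⟩ := p
      by_cases hj : j = i
      · simp [pvAInner, hj, ih]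
      · by_cases hd : PySem.Set.isdisjoint curr s <;> simp [pvAInner, hj, hd, ih]

-- Filtering an enumerated list with an index-aware predicate that agrees with an
-- index-free one at each position.
theorem pvFilterEnum {α β : Type} (L : List α) (F : Int × α → Bool) (G : α → Bool)
    (g : α → β) :
    ∀ (s : Int), (∀ (k : Nat) (hk : k < L.length), F (s + k, L[k]) = G L[k]) →
      ((PySem.List.enumerate L s).filter F).map (fun p => g p.2) = (L.filter G).map g := by
  induction L with
  | nil => intro s _; rfl
  | cons x xs ih =>
      intro s h
      rw [PySem.List.enumerate_cons]
      have h0 : F (s, x) = G x := by simpa using h 0 (by simp)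
      have htail : ∀ (k : Nat) (hk : k < xs.length), F ((s + 1) + k, xs[k]) = G xs[k] := by
        intro k hk
        have h' := h (k + 1) (by simpa using Nat.succ_lt_succ hk)
        simp only [List.getElem_cons_succ] at h'
        push_cast at h'
        rw [show (s + 1) + (k : Int) = s + ((k : Int) + 1) by ring]
        exact h'
      by_cases hx : G x = true <;>
        simp [h0, hx, ih (s + 1) htail]

-- count of r in the concatenation of the relation sets = number of subqueries whose
-- relation set contains r (each set has no duplicates).
theorem pvCountFlatten (rsets : List (PySem.Set String)) (hnd : ∀ t ∈ rsets, t.Nodup) (r : String) :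
    (rsets.flatten.count r) = rsets.countP (fun t => decide (r ∈ t)) := by
  induction rsets with
  | nil => rfl
  | cons t rest ih =>
      have hndt := hnd t (by simp)
      have ihr := ih (fun t' ht' => hnd t' (by simp [ht']))
      rw [List.flatten_cons, List.count_append, List.countP_cons, ihr]
      by_cases hm : r ∈ t
      · rw [List.count_eq_one_of_mem hndt hm]; simp [hm, Nat.add_comm]
      · rw [List.count_eq_zero_of_not_mem hm]; simp [hm]

-- countP ≥ 2 at a position already satisfying the predicate ↔ another position satisfies it.
theorem pvCountPTwo {α : Type} (l : List α) (k : Nat) (hk : k < l.length) (p : α → Bool)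
    (hp : p l[k] = true) :
    2 ≤ l.countP p ↔ ∃ j, ∃ hj : j < l.length, j ≠ k ∧ p l[j] = true := by
  have hsplit : l = l.take k ++ l[k] :: l.drop (k + 1) := by
    conv_lhs => rw [← List.take_append_drop k l]
    congr 1
    rw [List.drop_eq_getElem_cons hk]
  have hcount : l.countP p
      = (l.take k).countP p + (l.drop (k + 1)).countP p + 1 := by
    calc l.countP p = (l.take k ++ l[k] :: l.drop (k + 1)).countP p := by rw [← hsplit]
      _ = _ := by rw [List.countP_append, List.countP_cons, hp, if_pos rfl]; omega
  constructor
  · intro h2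
    have : 0 < (l.take k).countP p ∨ 0 < (l.drop (k + 1)).countP p := by omega
    rcases this with h | h
    · obtain ⟨a, ha, hpa⟩ := List.countP_pos_iff.mp h
      obtain ⟨j, hj, rfl⟩ := List.mem_iff_getElem.mp ha
      rw [List.length_take] at hj
      refine ⟨j, by omega, by omega, ?_⟩
      rwa [List.getElem_take] at hpa
    · obtain ⟨a, ha, hpa⟩ := List.countP_pos_iff.mp h
      obtain ⟨j, hj, rfl⟩ := List.mem_iff_getElem.mp ha
      rw [List.length_drop] at hj
      refine ⟨k + 1 + j, by omega, by omega, ?_⟩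
      rwa [List.getElem_drop] at hpa
  · rintro ⟨j, hj, hjk, hpj⟩
    rcases Nat.lt_or_ge j k with hlt | hge
    · have h : 0 < (l.take k).countP p := by
        apply List.countP_pos_iff.mpr
        refine ⟨l[j], ?_, hpj⟩
        rw [List.mem_iff_getElem]
        refine ⟨j, ?_, List.getElem_take⟩
        rw [List.length_take]; omega
      omega
    · have h : 0 < (l.drop (k + 1)).countP p := by
        apply List.countP_pos_iff.mpr
        refine ⟨l[j], ?_, hpj⟩
        rw [List.mem_iff_getElem]
        refine ⟨j - (k + 1), by rw [List.length_drop]; omega, ?_⟩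
        rw [List.getElem_drop]
        congr 1
        omega
      omega

-- Pointwise agreement of A's dependency test at index k with B's count test.
theorem pvPointwise (rsets : List (PySem.Set String)) (hnd : ∀ t ∈ rsets, t.Nodup)
    (k : Nat) (hk : k < rsets.length) :
    pvAInner (k : Int) rsets[k] (PySem.List.enumerate rsets 0)
      = !(rsets[k].all (fun r => (PySem.Dict.counter rsets.flatten).getD r 0 == (1 : Int))) := by
  rw [pvAInner_eq_any]
  rcases Bool.eq_false_or_eq_true (rsets[k].all
      (fun r => (PySem.Dict.counter rsets.flatten).getD r 0 == (1 : Int))) with hall | hall <;>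
    rw [hall]
  · -- every relation has count 1 ⇒ no other subquery shares a relation
    simp only [Bool.not_true]
    rw [← Bool.not_eq_true, List.any_eq_true]
    rintro ⟨⟨ji, t⟩, hmem, hcond⟩
    rw [PySem.List.mem_enumerate_iff] at hmem
    obtain ⟨j, hj, hpe⟩ := hmem
    rw [Prod.mk.injEq] at hpe
    obtain ⟨hji, ht⟩ := hpe
    rw [zero_add] at hji
    subst hji ht
    simp only [Bool.and_eq_true, Bool.not_eq_true'] at hcond
    obtain ⟨hne, hdis⟩ := hcond
    rw [← Bool.not_eq_true, PySem.Set.isdisjoint_iff] at hdis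
    push_neg at hdis
    obtain ⟨r, hr, hrt⟩ := hdis
    rw [List.all_eq_true] at hall
    have hv := hall r hr
    rw [PySem.Dict.getD_counter, pvCountFlatten rsets hnd r] at hv
    have hone : rsets.countP (fun t => decide (r ∈ t)) = 1 := by
      have := beq_iff_eq.mp hv
      exact_mod_cast this
    have hjk : j ≠ k := by
      intro h; subst h
      simp at hne
    have h2 : 2 ≤ rsets.countP (fun t => decide (r ∈ t)) :=
      (pvCountPTwo rsets k hk (fun t => decide (r ∈ t)) (by simpa using hr)).mpr
        ⟨j, hj, hjk, by simpa using hrt⟩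
    omega

  · -- some relation of rsets[k] has count ≠ 1 ⇒ A's inner loop finds a j
    simp only [Bool.not_false]
    have hall' : ¬ (∀ r ∈ rsets[k], ((PySem.Dict.counter rsets.flatten).getD r 0 == (1 : Int)) = true) := by
      rw [← List.all_eq_true, hall]; simp
    push_neg at hall'
    obtain ⟨r, hr, hc⟩ := hall'
    rw [List.any_eq_true]
    have hcount : rsets.flatten.count r = rsets.countP (fun t => decide (r ∈ t)) :=
      pvCountFlatten rsets hnd r
    have h1 : 1 ≤ rsets.countP (fun t => decide (r ∈ t)) :=
      List.countP_pos_iff.mpr ⟨rsets[k], List.getElem_mem hk, by simpa using hr⟩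
    have h2 : 2 ≤ rsets.countP (fun t => decide (r ∈ t)) := by
      rcases Nat.lt_or_ge (rsets.countP (fun t => decide (r ∈ t))) 2 with hlt | hge
      · exfalso
        apply hc
        rw [PySem.Dict.getD_counter, hcount]
        have : rsets.countP (fun t => decide (r ∈ t)) = 1 := by omega
        simp [this]
      · exact hge
    obtain ⟨j, hj, hjk, hpj⟩ :=
      (pvCountPTwo rsets k hk (fun t => decide (r ∈ t)) (by simpa using hr)).mp h2
    refine ⟨((j : Int), rsets[j]), ?_, ?_⟩
    · rw [PySem.List.mem_enumerate_iff]
      exact ⟨j, hj, by simp⟩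
    · simp only [Bool.and_eq_true, Bool.not_eq_true']
      constructor
      · simp [hjk]
      · refine Bool.eq_false_iff.mpr ?_
        intro hdis
        rw [PySem.Set.isdisjoint_iff] at hdis
        exact hdis r hr (by simpa using hpj)
-- ===== VERDICT (by name: the statement is the Claim_ definition above) =====
theorem check_indpt_UCQ_spec : Claim_equal_check_indpt_UCQ := by
  intro q _ _
  unfold Spec_check_indpt_UCQ check_indpt_UCQ check_indpt_UCQ_alt
  simp only [pvRelSet_eq]
  set rsets := q.map pvRelSet with hrs
  have hcounts : rsets.foldl
      (fun d s => s.foldl (fun d r => d.insert r (d.getD r 0 + 1)) d) PySem.Dict.empty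
      = PySem.Dict.counter rsets.flatten := by
    rw [← PySem.Dict.foldl_insert_getD_add_one_eq_counter, List.foldl_flatten]
  rw [hcounts, pvPartFold, pvPartFold']
  have hlen : (q.zip rsets).length = q.length := by simp [hrs]
  have hnd : ∀ t ∈ rsets, t.Nodup := by
    intro t ht
    obtain ⟨c, _, rfl⟩ := List.mem_map.mp ht
    exact PySem.Set.nodup_ofList _
  have hpt : ∀ (k : Nat) (hk : k < (q.zip rsets).length),
      pvAInner ((0 : Int) + k) ((q.zip rsets)[k]).2 (PySem.List.enumerate rsets 0)
        = !(((q.zip rsets)[k]).2.all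
            (fun r => (PySem.Dict.counter rsets.flatten).getD r 0 == (1 : Int))) := by
    intro k hk
    have hk' : k < rsets.length := by simp [hrs]; omega
    have hz : (q.zip rsets)[k] = (q[k]'(by omega), rsets[k]'hk') := by
      simp
    rw [hz]
    simpa using pvPointwise rsets hnd k hk'
  rw [Prod.mk.injEq]
  refine ⟨?_, ?_⟩
  · exact pvFilterEnum (q.zip rsets)
      (fun p => !pvAInner p.1 p.2.2 (PySem.List.enumerate rsets 0))
      (fun p => p.2.all (fun r => (PySem.Dict.counter rsets.flatten).getD r 0 == (1 : Int)))
      (fun p => p.1) 0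
      (fun k hk => by simp only [hpt k hk, Bool.not_not])
  · exact pvFilterEnum (q.zip rsets)
      (fun p => pvAInner p.1 p.2.2 (PySem.List.enumerate rsets 0))
      (fun p => !(p.2.all (fun r => (PySem.Dict.counter rsets.flatten).getD r 0 == (1 : Int))))
      (fun p => p.1) 0
      (fun k hk => by simp only [hpt k hk])
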